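-- pv_equiv track=rewrite | github.com/gonzavalenz/trabajos_practicos | trabajo7.py | desencriptado1
-- ===== SOURCE A (Python) =====
-- def desencriptado1(cadena):
--     nueva_cadena = ''
--     cadena1 = ''
--     cadena2 = ''
--     i = 0
--     while len(cadena) > 1:
--         cadena1 += cadena[i]
--         cadena = cadena[1:]
--         cadena2 += cadena[i]
--         cadena = cadena[1:]
--     cadena2 = cadena2[::-1]
--     if len(cadena) > 0:
--         cadena1 += cadena
--     nueva_cadena = cadena1 + cadena2
--     return nueva_cadena
-- ===== SOURCE B (Python) =====
-- def desencriptado1(cadena):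
--     # even-position chars, then odd-position chars reversed
--     return cadena[::2] + cadena[1::2][::-1]
-- ===== Notes on version B (the rewrite author's own statement) =====
-- stated objective: faster
-- what changed: A's destructive while-loop (repeatedly re-slicing the string and accumulating two strings char by char, then reversing one) is replaced by a single expression with two strided slices: cadena[::2] + cadena[1::2][::-1].
import Mathlib
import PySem

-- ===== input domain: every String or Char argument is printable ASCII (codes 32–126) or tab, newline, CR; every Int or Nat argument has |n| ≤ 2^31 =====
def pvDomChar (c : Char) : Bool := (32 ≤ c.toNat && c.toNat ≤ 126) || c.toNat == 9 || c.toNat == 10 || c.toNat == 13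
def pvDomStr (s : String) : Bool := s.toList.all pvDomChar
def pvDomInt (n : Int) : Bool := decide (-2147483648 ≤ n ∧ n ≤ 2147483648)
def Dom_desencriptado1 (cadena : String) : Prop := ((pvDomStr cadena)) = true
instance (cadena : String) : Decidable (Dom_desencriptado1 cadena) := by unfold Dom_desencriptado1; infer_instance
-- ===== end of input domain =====

-- B replaces A's destructive while-loop (repeated slicing with manual accumulators and a
-- final reversal) by two strided slices, `cadena[::2] + cadena[1::2][::-1]`: simpler/idiomatic.

-- ===== PORT A =====
-- A's while loop, state (cadena1, cadena2, cadena): each iteration appends cadena[0] to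
-- cadena1, drops it, appends the new cadena[0] to cadena2, drops it; stops when len ≤ 1.
def desencriptado1Loop (c1 c2 cad : List Char) : List Char × List Char × List Char :=
  match cad with
  | a :: b :: rest => desencriptado1Loop (c1 ++ [a]) (c2 ++ [b]) rest
  | _ => (c1, c2, cad)

def desencriptado1 (cadena : String) : String :=
  match desencriptado1Loop [] [] cadena.toList with
  | (c1, c2, rest) =>
    -- cadena2 = cadena2[::-1]  (a step -1 slice never fails, so getD is unreachable)
    let c2r := (PySem.List.slice? c2 none none (-1)).getD []
    -- if len(cadena) > 0: cadena1 += cadena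
    let c1' := if rest.length > 0 then c1 ++ rest else c1
    String.ofList (c1' ++ c2r)

-- ===== PORT B =====
-- Source B: return cadena[::2] + cadena[1::2][::-1]   (steps are nonzero, so getD is unreachable)
def desencriptado1_alt (cadena : String) : String :=
  let ev := (PySem.List.slice? cadena.toList none none 2).getD []
  let od := (PySem.List.slice? cadena.toList (some 1) none 2).getD []
  let odr := (PySem.List.slice? od none none (-1)).getD []
  String.ofList (ev ++ odr)

-- ===== PRECONDITION & SPEC =====
def Spec_desencriptado1 (cadena : String) (out : String) : Prop := out = desencriptado1_alt cadena
instance (cadena : String) (out : String) : Decidable (Spec_desencriptado1 cadena out) := by unfold Spec_desencriptado1; infer_instance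

-- ===== CLAIM (what is proved, stated in full; the proofs are below) =====
def Claim_equal_desencriptado1 : Prop := ∀ (cadena : String), Dom_desencriptado1 cadena → Spec_desencriptado1 cadena (desencriptado1 cadena)

-- ===== LEMMAS AND PROOFS =====

-- even-position characters of l (a trailing unpaired char included)
def pvEvens : List Char → List Char
  | [] => []
  | [a] => [a]
  | a :: _ :: t => a :: pvEvens t

-- odd-position characters of l
def pvOdds : List Char → List Char
  | [] => []
  | [_] => []
  | _ :: b :: t => b :: pvOdds t

-- even-position characters that A's loop collects (leftover single char excluded)
def pvEvensP : List Char → List Char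
  | [] => []
  | [_] => []
  | a :: _ :: t => a :: pvEvensP t

-- what remains of cadena when A's loop stops
def pvRest : List Char → List Char
  | [] => []
  | [a] => [a]
  | _ :: _ :: t => pvRest t

theorem pvEvens_split (l : List Char) : pvEvens l = pvEvensP l ++ pvRest l := by
  induction l using pvEvens.induct <;> simp_all [pvEvens, pvEvensP, pvRest]

theorem pvLoop_eq (l : List Char) : ∀ c1 c2,
    desencriptado1Loop c1 c2 l = (c1 ++ pvEvensP l, c2 ++ pvOdds l, pvRest l) := by
  induction l using pvEvens.induct with
  | case1 => intro c1 c2; simp [desencriptado1Loop, pvEvensP, pvOdds, pvRest]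
  | case2 a => intro c1 c2; simp [desencriptado1Loop, pvEvensP, pvOdds, pvRest]
  | case3 a b t ih => intro c1 c2; simp [desencriptado1Loop, pvEvensP, pvOdds, pvRest, ih]

theorem pvFm_even (l : List Char) :
    (List.range ((l.length + 1) / 2)).filterMap (fun k => l[2 * k]?) = pvEvens l := by
  induction l using pvEvens.induct with
  | case1 => simp [pvEvens]
  | case2 a => simp [pvEvens]
  | case3 a b t ih =>
    have hlen : ((a :: b :: t).length + 1) / 2 = (t.length + 1) / 2 + 1 := by
      simp only [List.length_cons]; omega
    rw [hlen, List.range_succ_eq_map, List.filterMap_cons, List.filterMap_map]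
    have hx : ∀ k : Nat, (a :: b :: t)[2 * Nat.succ k]? = t[2 * k]? := by
      intro k
      have h2 : 2 * Nat.succ k = 2 * k + 1 + 1 := by omega
      rw [h2]; rfl
    simp only [Function.comp_def, hx]
    simp [pvEvens, ih]

theorem pvFm_odd (l : List Char) :
    (List.range (l.length / 2)).filterMap (fun k => l[2 * k + 1]?) = pvOdds l := by
  induction l using pvEvens.induct with
  | case1 => simp [pvOdds]
  | case2 a => simp [pvOdds]
  | case3 a b t ih =>
    have hlen : (a :: b :: t).length / 2 = t.length / 2 + 1 := by
      simp only [List.length_cons]; omega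
    rw [hlen, List.range_succ_eq_map, List.filterMap_cons, List.filterMap_map]
    have hx : ∀ k : Nat, (a :: b :: t)[2 * Nat.succ k + 1]? = t[2 * k + 1]? := by
      intro k
      have h2 : 2 * Nat.succ k + 1 = 2 * k + 1 + 1 + 1 := by omega
      rw [h2]; rfl
    simp only [Function.comp_def, hx]
    simp [pvOdds, ih]

theorem pvSlice_even (l : List Char) :
    PySem.List.slice? l none none 2 = some (pvEvens l) := by
  simp only [PySem.List.slice?, PySem.List.sliceIndices]
  norm_num
  have hc : (if 0 < l.length then (((l.length : Int) + 2 - 1) / 2).toNat else 0)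
      = (l.length + 1) / 2 := by split_ifs <;> omega
  have hi : ∀ x : Nat, ((2 : Int) * (x : Int)).toNat = 2 * x := by intro x; omega
  rw [hc]
  simp only [hi]
  exact pvFm_even l

theorem pvSlice_odd (l : List Char) :
    PySem.List.slice? l (some 1) none 2 = some (pvOdds l) := by
  rcases l with _ | ⟨c, t⟩
  · decide
  · simp only [PySem.List.slice?, PySem.List.sliceIndices]
    norm_num
    have hc : (if 0 < t.length then (((t.length : Int) + 2 - 1) / 2).toNat else 0)
        = (c :: t).length / 2 := by
      simp only [List.length_cons]; split_ifs <;> omega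
    have hi : ∀ x : Nat, ((1 : Int) + 2 * (x : Int)).toNat = 2 * x + 1 := by intro x; omega
    rw [hc]
    simp only [hi]
    exact pvFm_odd _

theorem desencriptado1_spec : Claim_equal_desencriptado1 := by
  unfold Claim_equal_desencriptado1
  intro cadena _
  unfold Spec_desencriptado1 desencriptado1 desencriptado1_alt
  rw [pvLoop_eq]
  simp only [pvSlice_even, pvSlice_odd, PySem.List.slice?_none_none_neg_one, Option.getD_some,
    List.nil_append]
  congr 1
  rw [pvEvens_split]
  split_ifs with h
  · simp
  · have hr : pvRest cadena.toList = [] := by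
      cases hrr : pvRest cadena.toList with
      | nil => rfl
      | cons x xs => rw [hrr] at h; simp at h
    simp [hr]
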